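-- pv_equiv track=rewrite | github.com/ogrendaniel/Cryptology | break2.py | find_bigrams_and_distances
-- ===== SOURCE A (Python) =====
-- def find_bigrams_and_distances(text):
--     bigrams = {}
--     # Loop through the text to extract each pair of consecutive characters (bigrams)
--     for i in range(len(text) - 1):
--         bigram = text[i:i+2]  # Extract a bigram starting at the current position
--         if bigram not in bigrams:
--             bigrams[bigram] = []  # If this bigram is new, initialize an empty list for it
--         bigrams[bigram].append(i)  # Append the current position (index) of the bigram
--
--     distances = {}
--     # Now, for each bigram, calculate the distances between its occurrences
--     for bigram, positions in bigrams.items():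
--         if len(positions) > 1:  # Only process bigrams that occur more than once
--             # Calculate the distance between consecutive occurrences of the bigram
--             # This is done by subtracting the position of each occurrence from the next one
--             distances[bigram] = [positions[i] - positions[i-1] for i in range(1, len(positions))]
--
--     return distances
-- ===== SOURCE B (Python) =====
-- def find_bigrams_and_distances(text):
--     # One pass: remember each bigram's last index and accumulate gaps directly,
--     # never building the full positions lists.
--     state = {}  # bigram -> [last_index, gaps_so_far]
--     for i in range(len(text) - 1):
--         bg = text[i:i+2]
--         prev = state.get(bg)
--         if prev is None:
--             state[bg] = [i, []]
--         else:
--             prev[1].append(i - prev[0])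
--             prev[0] = i
--     return {bg: gaps for bg, (_last, gaps) in state.items() if gaps}
-- ===== Notes on version B (the rewrite author's own statement) =====
-- stated objective: alternative
-- what changed: Single pass keeping only each bigram's last index and accumulated gaps in one dict, instead of first building full position lists and then a second pass computing consecutive differences.
import Mathlib
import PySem

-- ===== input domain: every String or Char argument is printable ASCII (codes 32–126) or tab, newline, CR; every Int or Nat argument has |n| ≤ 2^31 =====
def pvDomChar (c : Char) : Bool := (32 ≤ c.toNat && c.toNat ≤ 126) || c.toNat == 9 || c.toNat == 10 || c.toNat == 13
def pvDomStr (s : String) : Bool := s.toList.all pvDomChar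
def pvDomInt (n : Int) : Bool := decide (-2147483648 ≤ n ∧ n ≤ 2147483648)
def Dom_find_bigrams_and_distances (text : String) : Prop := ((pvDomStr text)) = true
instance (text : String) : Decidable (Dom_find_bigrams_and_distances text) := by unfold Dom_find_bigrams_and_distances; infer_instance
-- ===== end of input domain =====

-- B changes the decomposition (one pass tracking last index + gaps instead of two passes via position lists); no speed claim.

-- ===== PORT A =====
-- A's inner comprehension [positions[i] - positions[i-1] for i in range(1, len(positions))];
-- indices 1 ≤ i < len are always in range, so pyGetD's default 0 is never read.
def pvGapsA (ps : List Int) : List Int :=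
  (PySem.List.pyRange 1 (ps.length : Int) 1).map
    (fun i => PySem.List.pyGetD ps i 0 - PySem.List.pyGetD ps (i - 1) 0)

def find_bigrams_and_distances (text : String) : List (String × List Int) :=
  let cs := text.toList
  let bigrams :=
    (PySem.List.pyRange 0 ((cs.length : Int) - 1) 1).foldl
      (fun d i =>
        let bigram := String.ofList (PySem.List.slice cs (some i) (some (i + 2)))
        let d := if d.contains bigram then d else d.insert bigram ([] : List Int)
        d.modify bigram [] (fun ps => ps ++ [i]))
      (PySem.Dict.empty : PySem.Dict String (List Int))
  let distances :=
    bigrams.items.foldl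
      (fun dist p =>
        if p.2.length > 1 then dist.insert p.1 (pvGapsA p.2) else dist)
      (PySem.Dict.empty : PySem.Dict String (List Int))
  distances.items

-- ===== PORT B =====
def find_bigrams_and_distances_alt (text : String) : List (String × List Int) :=
  let cs := text.toList
  let state :=
    (PySem.List.pyRange 0 ((cs.length : Int) - 1) 1).foldl
      (fun d i =>
        let bg := String.ofList (PySem.List.slice cs (some i) (some (i + 2)))
        match d.get? bg with
        | none => d.insert bg (i, ([] : List Int))
        | some (last, gaps) => d.insert bg (i, gaps ++ [i - last]))
      (PySem.Dict.empty : PySem.Dict String (Int × List Int))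
  state.items.filterMap (fun p => if p.2.2 ≠ [] then some (p.1, p.2.2) else none)

-- ===== PRECONDITION & SPEC =====
def Spec_find_bigrams_and_distances (text : String) (out : List (String × List Int)) : Prop := out = find_bigrams_and_distances_alt text
instance (text : String) (out : List (String × List Int)) : Decidable (Spec_find_bigrams_and_distances text out) := by unfold Spec_find_bigrams_and_distances; infer_instance

-- ===== CLAIM (what is proved, stated in full; the proofs are below) =====
def Claim_equal_find_bigrams_and_distances : Prop := ∀ (text : String), Dom_find_bigrams_and_distances text → Spec_find_bigrams_and_distances text (find_bigrams_and_distances text)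

-- ===== LEMMAS AND PROOFS =====

-- consecutive differences of a list
def pvDiffs : List Int → List Int
  | a :: b :: rest => (b - a) :: pvDiffs (b :: rest)
  | _ => []

-- B's per-bigram state is A's position list summarised as (last position, consecutive differences)
def pvF (p : String × List Int) : String × (Int × List Int) := (p.1, (p.2.getLastD 0, pvDiffs p.2))

def pvInv (dA : PySem.Dict String (List Int)) (dB : PySem.Dict String (Int × List Int)) : Prop :=
  dB.items = dA.items.map pvF ∧ (∀ p ∈ dA.items, p.2 ≠ []) ∧ dA.keys.Nodup

theorem pvDiffs_length (ps : List Int) : (pvDiffs ps).length = ps.length - 1 := by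
  induction ps with
  | nil => simp [pvDiffs]
  | cons a t ih =>
    cases t with
    | nil => simp [pvDiffs]
    | cons b r => simp [pvDiffs] at ih ⊢; omega

theorem pvDiffs_getElem (ps : List Int) (j : Nat) (h : j + 1 < ps.length)
    (h1 : j < (pvDiffs ps).length) (h2 : j < ps.length) :
    (pvDiffs ps)[j] = ps[j+1] - ps[j] := by
  induction ps generalizing j with
  | nil => simp at h
  | cons a t ih =>
    cases t with
    | nil => simp at h
    | cons b r =>
      cases j with
      | zero => simp [pvDiffs]
      | succ k =>
        have hk : k + 1 < (b :: r).length := by simpa using h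
        simpa [pvDiffs] using ih k hk (by simpa [pvDiffs_length] using h1) (by omega)

theorem pvDiffs_concat (ps : List Int) (x : Int) (h : ps ≠ []) :
    pvDiffs (ps ++ [x]) = pvDiffs ps ++ [x - ps.getLastD 0] := by
  induction ps with
  | nil => simp at h
  | cons a t ih =>
    cases t with
    | nil => simp [pvDiffs]
    | cons b r =>
      have := ih (by simp)
      simp only [List.cons_append, pvDiffs] at this ⊢
      rw [this]
      simp

theorem pvPyRange_one (n : Nat) :
    PySem.List.pyRange 1 (n : Int) 1 = (List.range (n - 1)).map (fun k : Nat => 1 + (k : Int)) := by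
  simp [PySem.List.pyRange]
  rw [show (if 1 < n then n - 1 else 0) = n - 1 by split <;> omega]

theorem pvGapsA_eq_pvDiffs (ps : List Int) : pvGapsA ps = pvDiffs ps := by
  apply List.ext_getElem
  · simp [pvGapsA, pvDiffs_length, pvPyRange_one]
  · intro j h1 h2
    have hlen : j < ps.length - 1 := by
      simpa [pvGapsA, pvPyRange_one] using h1
    simp only [pvGapsA, pvPyRange_one, List.getElem_map, List.getElem_range]
    have e1 : (1 : Int) + (j : Int) = ((j + 1 : Nat) : Int) := by push_cast; ring
    have e2 : ((j + 1 : Nat) : Int) - 1 = ((j : Nat) : Int) := by push_cast; ring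
    rw [e1, e2, PySem.List.pyGetD_natCast, PySem.List.pyGetD_natCast,
      pvDiffs_getElem ps j (by omega) h2 (by omega),
      List.getD_eq_getElem ps 0 (by omega), List.getD_eq_getElem ps 0 (by omega)]

theorem pvDiffs_ne_nil_iff (ps : List Int) (h : ps ≠ []) :
    (pvDiffs ps ≠ []) ↔ (ps.length > 1) := by
  have hl := pvDiffs_length ps
  have h0 : 0 < ps.length := List.length_pos_iff.mpr h
  rw [ne_eq, ← List.length_eq_zero_iff, hl]
  omega

-- one step of both loops preserves the invariant
theorem pvStep (dA : PySem.Dict String (List Int)) (dB : PySem.Dict String (Int × List Int))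
    (bg : String) (i : Int) (h : pvInv dA dB) :
    pvInv ((if dA.contains bg then dA else dA.insert bg ([] : List Int)).modify bg [] (fun ps => ps ++ [i]))
      (match dB.get? bg with
        | none => dB.insert bg (i, ([] : List Int))
        | some (last, gaps) => dB.insert bg (i, gaps ++ [i - last])) := by
  obtain ⟨hitems, hne, hnd⟩ := h
  have hkeysB : dB.keys = dA.keys := by
    simp only [PySem.Dict.keys, hitems, List.map_map]
    rfl
  cases hA : dA.get? bg with
  | none =>
    have hcontA : dA.contains bg = false := (PySem.Dict.get?_eq_none_iff_contains dA bg).mp hA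
    have hmemK : bg ∉ dA.keys := (PySem.Dict.get?_eq_none_iff_not_mem_keys dA bg).mp hA
    have hB : dB.get? bg = none := by
      rw [PySem.Dict.get?_eq_none_iff_not_mem_keys, hkeysB]; exact hmemK
    have hcontB : dB.contains bg = false := (PySem.Dict.get?_eq_none_iff_contains dB bg).mp hB
    have eqA : (if dA.contains bg then dA else dA.insert bg ([] : List Int)).modify bg []
        (fun ps => ps ++ [i]) = dA.insert bg [i] := by
      rw [hcontA]
      simp [PySem.Dict.modify, PySem.Dict.getD_insert_self, PySem.Dict.insert_insert_self]
    rw [hB, eqA]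
    refine ⟨?_, ?_, ?_⟩
    · rw [PySem.Dict.items_insert_of_not_contains dA [i] hcontA,
        PySem.Dict.items_insert_of_not_contains dB (i, ([] : List Int)) hcontB,
        hitems, List.map_append]
      rfl
    · intro p hp
      rw [PySem.Dict.items_insert_of_not_contains dA [i] hcontA] at hp
      rcases List.mem_append.mp hp with h1 | h1
      · exact hne p h1
      · simp only [List.mem_singleton] at h1
        subst h1; simp
    · rw [PySem.Dict.keys_insert_of_not_contains dA [i] hcontA]
      simp only [List.nodup_append, List.nodup_singleton, true_and]
      refine ⟨hnd, ?_⟩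
      intro a ha b hb
      simp only [List.mem_singleton] at hb
      exact fun e => hmemK ((hb ▸ e) ▸ ha)
  | some ps =>
    have hcontA : dA.contains bg = true := by
      rw [PySem.Dict.contains_eq_isSome_get?, hA]; rfl
    have hmemA : (bg, ps) ∈ dA.items := PySem.Dict.mem_items_of_get?_eq_some dA hA
    have hpsne : ps ≠ [] := hne (bg, ps) hmemA
    have hndB : dB.keys.Nodup := by rw [hkeysB]; exact hnd
    have hB : dB.get? bg = some (ps.getLastD 0, pvDiffs ps) := by
      refine PySem.Dict.get?_of_mem_items dB ?_ hndB
      rw [hitems]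
      exact List.mem_map.mpr ⟨(bg, ps), hmemA, rfl⟩
    have hcontB : dB.contains bg = true := by
      rw [PySem.Dict.contains_eq_isSome_get?, hB]; rfl
    have eqA : (if dA.contains bg then dA else dA.insert bg ([] : List Int)).modify bg []
        (fun ps => ps ++ [i]) = dA.insert bg (ps ++ [i]) := by
      rw [hcontA]
      simp [PySem.Dict.modify, PySem.Dict.getD_of_get?_eq_some dA [] hA]
    rw [hB, eqA]
    refine ⟨?_, ?_, ?_⟩
    · rw [PySem.Dict.items_insert_of_contains dA _ hcontA,
        PySem.Dict.items_insert_of_contains dB _ hcontB,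
        hitems, List.map_map, List.map_map]
      refine List.map_congr_left ?_
      intro p hp
      by_cases hpb : p.1 = bg
      · have hps : p = (bg, ps) := by
          have h2 := PySem.Dict.get?_of_mem_items dA (k := p.1) (v := p.2) (by simpa using hp) hnd
          rw [hpb, hA] at h2
          obtain ⟨p1, p2⟩ := p
          simp only at hpb
          simp only [Option.some.injEq] at h2
          rw [hpb, ← h2]
        subst hps
        simp [Function.comp, pvF, pvDiffs_concat ps i hpsne]
      · have hpb' : (p.1 == bg) = false := by simpa using hpb
        simp [Function.comp, pvF, hpb']
    · intro p hp
      rw [PySem.Dict.items_insert_of_contains dA _ hcontA] at hp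
      obtain ⟨q, hq, rfl⟩ := List.mem_map.mp hp
      by_cases hqb : q.1 = bg
      · have : (q.1 == bg) = true := by simpa using hqb
        simp [this]
      · have : (q.1 == bg) = false := by simpa using hqb
        simpa [this] using hne q hq
    · rw [PySem.Dict.keys_insert_of_contains dA _ hcontA]
      exact hnd

-- both loops, run over the same index list, stay related
theorem pvFold (cs : List Char) (L : List Int) (dA : PySem.Dict String (List Int))
    (dB : PySem.Dict String (Int × List Int)) (h : pvInv dA dB) :
    pvInv
      (L.foldl (fun d i =>
        let bigram := String.ofList (PySem.List.slice cs (some i) (some (i + 2)))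
        let d := if d.contains bigram then d else d.insert bigram ([] : List Int)
        d.modify bigram [] (fun ps => ps ++ [i])) dA)
      (L.foldl (fun d i =>
        let bg := String.ofList (PySem.List.slice cs (some i) (some (i + 2)))
        match d.get? bg with
        | none => d.insert bg (i, ([] : List Int))
        | some (last, gaps) => d.insert bg (i, gaps ++ [i - last])) dB) := by
  induction L generalizing dA dB with
  | nil => exact h
  | cons a t ih => exact ih _ _ (pvStep dA dB _ a h)

-- A's second loop over an assoc list with distinct, fresh keys just filters and maps
theorem pvExtractA (LA : List (String × List Int)) (acc : PySem.Dict String (List Int))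
    (hfresh : ∀ p ∈ LA, acc.contains p.1 = false) (hnd : (LA.map Prod.fst).Nodup) :
    (LA.foldl (fun dist p => if p.2.length > 1 then dist.insert p.1 (pvGapsA p.2) else dist) acc).items
      = acc.items ++ LA.filterMap (fun p => if p.2.length > 1 then some (p.1, pvGapsA p.2) else none) := by
  induction LA generalizing acc with
  | nil => simp
  | cons p t ih =>
    simp only [List.foldl_cons, List.filterMap_cons]
    have hfp := hfresh p (by simp)
    rw [List.map_cons] at hnd
    have hnd' := List.nodup_cons.mp hnd
    by_cases hc : p.2.length > 1
    · rw [if_pos hc, if_pos hc,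
        ih (acc.insert p.1 (pvGapsA p.2))
          (fun q hq => by
            rw [PySem.Dict.contains_insert]
            have hq1 : q.1 ≠ p.1 := fun e => hnd'.1 (e ▸ List.mem_map_of_mem hq)
            simp [hq1, hfresh q (List.mem_cons_of_mem _ hq)])
          hnd'.2,
        PySem.Dict.items_insert_of_not_contains acc _ hfp]
      simp
    · rw [if_neg hc, if_neg hc]
      exact ih acc (fun q hq => hfresh q (List.mem_cons_of_mem _ hq)) hnd'.2

-- ===== VERDICT (by name: the statement is the Claim_ definition above) =====
theorem find_bigrams_and_distances_spec : Claim_equal_find_bigrams_and_distances := by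
  intro text _
  unfold Spec_find_bigrams_and_distances find_bigrams_and_distances find_bigrams_and_distances_alt
  dsimp only
  obtain ⟨hitems, hne, hnd⟩ :=
    pvFold text.toList (PySem.List.pyRange 0 ((text.toList.length : Int) - 1) 1)
      PySem.Dict.empty PySem.Dict.empty
      ⟨rfl, by intro p hp; simp [PySem.Dict.empty] at hp, PySem.Dict.nodup_keys_empty⟩
  dsimp only at hitems hne hnd
  rw [hitems, List.filterMap_map,
    pvExtractA _ PySem.Dict.empty (fun p _ => PySem.Dict.contains_empty p.1)
      (by simpa [PySem.Dict.keys] using hnd)]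
  rw [show (PySem.Dict.empty : PySem.Dict String (List Int)).items = [] from rfl, List.nil_append]
  refine (List.filterMap_congr ?_).symm
  intro p hp
  have hpne := hne p hp
  have hiff := pvDiffs_ne_nil_iff p.2 hpne
  simp only [Function.comp, pvF, pvGapsA_eq_pvDiffs]
  by_cases hc : p.2.length > 1
  · rw [if_pos hc, if_pos (hiff.mpr hc)]
  · rw [if_neg hc, if_neg (fun h2 => hc (hiff.mp h2))]
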